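-- pv_equiv track=rewrite | github.com/renderbox/django-stubtools | stubtools/core/astparse.py | ast_first_and_last_line
-- ===== SOURCE A (Python) =====
-- def ast_first_and_last_line(items):
--     first = None
--     last = None
--
--     if items:
--         for item in items:
--             if first == None or item['first_line'] < first:
--                 first = item['first_line']
--
--             if last == None or item['last_line'] > last:
--                 last = item['last_line']
--
--     return first, last
-- ===== SOURCE B (Python) =====
-- def ast_first_and_last_line(items):
--     if not items:
--         return None, None
--     by_first = sorted(items, key=lambda i: i['first_line'])
--     by_last = sorted(items, key=lambda i: i['last_line'], reverse=True)
--     return by_first[0]['first_line'], by_last[0]['last_line']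
-- ===== Notes on version B (the rewrite author's own statement) =====
-- stated objective: alternative
-- what changed: Replaces A's single linear scan maintaining running min/max accumulators with a sort-then-pick strategy: sort by first_line ascending and take the head, sort by last_line descending and take the head; trades O(n) for O(n log n) in exchange for no accumulator state.
import Mathlib
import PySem

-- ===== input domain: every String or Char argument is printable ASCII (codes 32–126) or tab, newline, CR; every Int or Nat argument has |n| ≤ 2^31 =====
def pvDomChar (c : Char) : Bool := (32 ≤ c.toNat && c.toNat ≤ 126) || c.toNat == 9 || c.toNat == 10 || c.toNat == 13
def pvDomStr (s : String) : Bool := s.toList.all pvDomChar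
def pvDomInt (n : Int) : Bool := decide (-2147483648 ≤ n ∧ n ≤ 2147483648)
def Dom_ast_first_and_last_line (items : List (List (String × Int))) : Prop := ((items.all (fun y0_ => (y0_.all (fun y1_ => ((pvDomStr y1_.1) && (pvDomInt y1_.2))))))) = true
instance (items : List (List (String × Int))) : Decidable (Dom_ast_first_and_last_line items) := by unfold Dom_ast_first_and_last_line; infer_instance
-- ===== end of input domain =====

-- B replaces A's single accumulator scan by sort-then-pick (two stable sorts, read the heads); alternative, not faster.

-- ===== PORT A =====
-- Port of A's single loop: one fold carrying the running (first, last) pair.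
-- Key lookup 'item[k]' is ported as PySem.Dict.getD with dummy 0; Pre_ guarantees
-- both keys are present, so the dummy is never used on admitted inputs.
def pvKey (item : List (String × Int)) (k : String) : Int :=
  (PySem.Dict.mk item).getD k 0

def pvStepA (st : Option Int × Option Int) (item : List (String × Int)) :
    Option Int × Option Int :=
  let fv := pvKey item "first_line"
  let lv := pvKey item "last_line"
  let first := match st.1 with
    | none => some fv
    | some f => if fv < f then some fv else some f
  let last := match st.2 with
    | none => some lv
    | some l => if lv > l then some lv else some l
  (first, last)

def ast_first_and_last_line (items : List (List (String × Int))) : Option Int × Option Int :=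
  if items.isEmpty then (none, none)
  else items.foldl pvStepA (none, none)

-- ===== PORT B =====
-- sorted(items, key=…)[0] ported as head? of PySem.List.sorted (the list is nonempty here).
def ast_first_and_last_line_alt (items : List (List (String × Int))) : Option Int × Option Int :=
  match items with
  | [] => (none, none)
  | _ =>
    let byFirst := PySem.List.sorted items (fun i => pvKey i "first_line") false
    let byLast := PySem.List.sorted items (fun i => pvKey i "last_line") true
    (byFirst.head?.map (fun i => pvKey i "first_line"),
     byLast.head?.map (fun i => pvKey i "last_line"))

-- ===== PRECONDITION & SPEC =====
-- Pre_ excludes exactly the inputs on which A raises KeyError: some item lacking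
-- the 'first_line' or 'last_line' key.
def Pre_ast_first_and_last_line (items : List (List (String × Int))) : Prop :=
  ∀ item ∈ items, (PySem.Dict.mk item).contains "first_line" = true ∧
    (PySem.Dict.mk item).contains "last_line" = true
instance (items : List (List (String × Int))) : Decidable (Pre_ast_first_and_last_line items) := by unfold Pre_ast_first_and_last_line; infer_instance
def pvWitness_ast_first_and_last_line : (List (List (String × Int))) :=
  [[("first_line", 2), ("last_line", 5)], [("first_line", 1), ("last_line", 3)]]
def Spec_ast_first_and_last_line (items : List (List (String × Int))) (out : Option Int × Option Int) : Prop := out = ast_first_and_last_line_alt items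
instance (items : List (List (String × Int))) (out : Option Int × Option Int) : Decidable (Spec_ast_first_and_last_line items out) := by unfold Spec_ast_first_and_last_line; infer_instance

-- ===== CLAIM (what is proved, stated in full; the proofs are below) =====
def Claim_equal_ast_first_and_last_line : Prop := ∀ (items : List (List (String × Int))), Dom_ast_first_and_last_line items → Pre_ast_first_and_last_line items → Spec_ast_first_and_last_line items (ast_first_and_last_line items)

-- ===== LEMMAS AND PROOFS =====

-- A's loop, once both accumulators are some, is the pair of running min / running max.
theorem pvFoldA_some (items : List (List (String × Int))) (f l : Int) :
    items.foldl pvStepA (some f, some l) =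
      (some (items.foldl (fun a i => min a (pvKey i "first_line")) f),
       some (items.foldl (fun a i => max a (pvKey i "last_line")) l)) := by
  induction items generalizing f l with
  | nil => simp
  | cons x t ih =>
    simp only [List.foldl_cons]
    rw [show pvStepA (some f, some l) x =
        (some (min f (pvKey x "first_line")), some (max l (pvKey x "last_line"))) from ?_]
    · exact ih _ _
    · simp only [pvStepA]
      rw [min_def, max_def]
      split_ifs <;> simp_all <;> omega

-- The running-min fold is a lower bound of its seed and of every key it sees.
theorem pvFoldMin_le {α : Type} (k : α → Int) (t : List α) (c : Int) :
    t.foldl (fun a i => min a (k i)) c ≤ c ∧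
      ∀ y ∈ t, t.foldl (fun a i => min a (k i)) c ≤ k y := by
  induction t generalizing c with
  | nil => simp
  | cons x t ih =>
    obtain ⟨h1, h2⟩ := ih (min c (k x))
    refine ⟨le_trans h1 (min_le_left _ _), ?_⟩
    intro y hy
    rcases List.mem_cons.mp hy with rfl | hy
    · exact le_trans h1 (min_le_right _ _)
    · exact h2 _ hy

-- …and it is the seed or one of the keys.
theorem pvFoldMin_mem {α : Type} (k : α → Int) (t : List α) (c : Int) :
    t.foldl (fun a i => min a (k i)) c = c ∨
      ∃ y ∈ t, t.foldl (fun a i => min a (k i)) c = k y := by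
  induction t generalizing c with
  | nil => simp
  | cons x t ih =>
    rcases ih (min c (k x)) with h | ⟨y, hy, h⟩
    · simp only [List.foldl_cons, h]
      rcases le_total c (k x) with hc | hc
      · exact Or.inl (min_eq_left hc)
      · exact Or.inr ⟨x, List.mem_cons_self, min_eq_right hc⟩
    · exact Or.inr ⟨y, List.mem_cons_of_mem _ hy, h⟩

theorem pvFoldMax_le {α : Type} (k : α → Int) (t : List α) (c : Int) :
    c ≤ t.foldl (fun a i => max a (k i)) c ∧
      ∀ y ∈ t, k y ≤ t.foldl (fun a i => max a (k i)) c := by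
  induction t generalizing c with
  | nil => simp
  | cons x t ih =>
    obtain ⟨h1, h2⟩ := ih (max c (k x))
    refine ⟨le_trans (le_max_left _ _) h1, ?_⟩
    intro y hy
    rcases List.mem_cons.mp hy with rfl | hy
    · exact le_trans (le_max_right _ _) h1
    · exact h2 _ hy

theorem pvFoldMax_mem {α : Type} (k : α → Int) (t : List α) (c : Int) :
    t.foldl (fun a i => max a (k i)) c = c ∨
      ∃ y ∈ t, t.foldl (fun a i => max a (k i)) c = k y := by
  induction t generalizing c with
  | nil => simp
  | cons x t ih =>
    rcases ih (max c (k x)) with h | ⟨y, hy, h⟩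
    · simp only [List.foldl_cons, h]
      rcases le_total (k x) c with hc | hc
      · exact Or.inl (max_eq_left hc)
      · exact Or.inr ⟨x, List.mem_cons_self, max_eq_right hc⟩
    · exact Or.inr ⟨y, List.mem_cons_of_mem _ hy, h⟩

-- The fold over x::t seeded with k x equals k m for any m ∈ x::t whose key is minimal.
theorem pvFoldMin_eq {α : Type} (k : α → Int) (x : α) (t : List α) (m : α)
    (hm : m ∈ x :: t) (hmin : ∀ y ∈ x :: t, k m ≤ k y) :
    t.foldl (fun a i => min a (k i)) (k x) = k m := by
  obtain ⟨h1, h2⟩ := pvFoldMin_le k t (k x)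
  apply le_antisymm
  · rcases List.mem_cons.mp hm with rfl | hm
    · exact h1
    · exact h2 _ hm
  · rcases pvFoldMin_mem k t (k x) with h | ⟨y, hy, h⟩
    · rw [h]; exact hmin x List.mem_cons_self
    · rw [h]; exact hmin y (List.mem_cons_of_mem _ hy)

theorem pvFoldMax_eq {α : Type} (k : α → Int) (x : α) (t : List α) (m : α)
    (hm : m ∈ x :: t) (hmax : ∀ y ∈ x :: t, k y ≤ k m) :
    t.foldl (fun a i => max a (k i)) (k x) = k m := by
  obtain ⟨h1, h2⟩ := pvFoldMax_le k t (k x)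
  apply le_antisymm
  · rcases pvFoldMax_mem k t (k x) with h | ⟨y, hy, h⟩
    · rw [h]; exact hmax x List.mem_cons_self
    · rw [h]; exact hmax y (List.mem_cons_of_mem _ hy)
  · rcases List.mem_cons.mp hm with rfl | hm
    · exact h1
    · exact h2 _ hm

-- ===== VERDICT (by name: the statement is the Claim_ definition above) =====
theorem ast_first_and_last_line_spec : Claim_equal_ast_first_and_last_line := by
  intro items _ _
  unfold Spec_ast_first_and_last_line ast_first_and_last_line ast_first_and_last_line_alt
  match items with
  | [] => simp
  | x :: t =>
    simp only [List.isEmpty_cons, if_neg Bool.false_ne_true, List.foldl_cons]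
    rw [show pvStepA (none, none) x =
        (some (pvKey x "first_line"), some (pvKey x "last_line")) from rfl]
    rw [pvFoldA_some]
    -- the sorted-by-first_line list is nonempty; name its head
    obtain ⟨mf, tf, hf⟩ : ∃ m t', PySem.List.sorted (x :: t) (fun i => pvKey i "first_line") false = m :: t' := by
      rcases h : PySem.List.sorted (x :: t) (fun i => pvKey i "first_line") false with _ | ⟨m, t'⟩
      · exact absurd ((PySem.List.sorted_eq_nil_iff _ _ _).mp h) (by simp)
      · exact ⟨m, t', rfl⟩
    obtain ⟨ml, tl, hl⟩ : ∃ m t', PySem.List.sorted (x :: t) (fun i => pvKey i "last_line") true = m :: t' := by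
      rcases h : PySem.List.sorted (x :: t) (fun i => pvKey i "last_line") true with _ | ⟨m, t'⟩
      · exact absurd ((PySem.List.sorted_eq_nil_iff _ _ _).mp h) (by simp)
      · exact ⟨m, t', rfl⟩
    have hmf : mf ∈ x :: t := by
      have := PySem.List.mem_sorted (x :: t) (fun i => pvKey i "first_line") false mf
      rw [hf] at this; exact this.mp List.mem_cons_self
    have hml : ml ∈ x :: t := by
      have := PySem.List.mem_sorted (x :: t) (fun i => pvKey i "last_line") true ml
      rw [hl] at this; exact this.mp List.mem_cons_self
    have hminf := PySem.List.key_head_sorted_le (x :: t) (fun i => pvKey i "first_line") hf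
    have hmaxl := PySem.List.key_head_sorted_rev_ge (x :: t) (fun i => pvKey i "last_line") hl
    simp only [hf, hl, List.head?_cons, Option.map_some]
    rw [pvFoldMin_eq (fun i => pvKey i "first_line") x t mf hmf hminf,
        pvFoldMax_eq (fun i => pvKey i "last_line") x t ml hml hmaxl]
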